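-- pv_equiv track=rewrite | github.com/tamotamo17/RSNA2025-3rd-place-solution | src/classification/datasets.py | _match_label_key
-- ===== SOURCE A (Python) =====
-- def _match_label_key(label_keys: list[str], site_name: str | None) -> str | None:
--     if not site_name:
--         return None
--     s = site_name.strip().lower()
--     for k in label_keys:
--         if k.lower() == s:
--             return k
--     cand = [k for k in label_keys if s in k.lower()]
--     return cand[0] if cand else None
-- ===== SOURCE B (Python) =====
-- def _match_label_key(label_keys: list[str], site_name: str | None) -> str | None:
--     if not site_name:
--         return None
--     s = site_name.strip().lower()
--     first_sub = None
--     for k in label_keys: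
--         kl = k.lower()
--         if kl == s:
--             return k
--         if first_sub is None and s in kl:
--             first_sub = k
--     return first_sub
-- ===== Notes on version B (the rewrite author's own statement) =====
-- stated objective: simpler
-- what changed: Fuses A's exact-match loop plus a second full substring-filter pass into one traversal that returns immediately on an exact match and remembers only the first substring candidate.
import Mathlib
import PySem

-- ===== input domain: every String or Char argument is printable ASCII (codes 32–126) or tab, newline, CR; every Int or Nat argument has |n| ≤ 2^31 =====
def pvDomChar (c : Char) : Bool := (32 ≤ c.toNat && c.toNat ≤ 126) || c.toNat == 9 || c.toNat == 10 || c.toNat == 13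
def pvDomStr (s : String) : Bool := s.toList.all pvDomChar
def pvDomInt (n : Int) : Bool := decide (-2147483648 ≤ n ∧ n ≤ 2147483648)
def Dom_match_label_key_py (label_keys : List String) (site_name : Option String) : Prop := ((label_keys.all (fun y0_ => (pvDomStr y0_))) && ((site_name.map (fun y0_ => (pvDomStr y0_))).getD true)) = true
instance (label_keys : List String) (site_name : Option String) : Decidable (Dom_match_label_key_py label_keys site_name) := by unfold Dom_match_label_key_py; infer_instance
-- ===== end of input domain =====

-- B fuses A's two passes (exact-match loop, then substring filter) into ONE traversal
-- remembering the first substring candidate; same result, simpler single pass.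

-- ===== PORT A =====
-- the 'for k in label_keys: if k.lower() == s: return k' loop
def pvALoop (s : String) : List String → Option String
  | [] => none
  | k :: rest => if PySem.Str.lower k == s then some k else pvALoop s rest

def match_label_key_py (label_keys : List String) (site_name : Option String) : Option String :=
  match site_name with
  | none => none
  | some sn =>
    if sn = "" then none      -- 'if not site_name' (empty string is falsy)
    else
      let s := PySem.Str.lower (PySem.Str.strip sn)
      match pvALoop s label_keys with
      | some k => some k
      | none =>
        let cand := label_keys.filter (fun k => PySem.Str.isIn s (PySem.Str.lower k))
        match cand with                     -- 'cand[0] if cand else None'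
        | [] => none
        | c :: _ => some c

-- ===== PORT B =====
-- single loop with the 'first_sub' accumulator
def pvBLoop (s : String) : List String → Option String → Option String
  | [], first_sub => first_sub
  | k :: rest, first_sub =>
    let kl := PySem.Str.lower k
    if kl == s then some k
    else if first_sub.isNone && PySem.Str.isIn s kl then pvBLoop s rest (some k)
    else pvBLoop s rest first_sub

def match_label_key_py_alt (label_keys : List String) (site_name : Option String) : Option String :=
  match site_name with
  | none => none
  | some sn =>
    if sn = "" then none
    else pvBLoop (PySem.Str.lower (PySem.Str.strip sn)) label_keys none

-- ===== PRECONDITION & SPEC =====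
def Spec_match_label_key_py (label_keys : List String) (site_name : Option String) (out : Option String) : Prop := out = match_label_key_py_alt label_keys site_name
instance (label_keys : List String) (site_name : Option String) (out : Option String) : Decidable (Spec_match_label_key_py label_keys site_name out) := by unfold Spec_match_label_key_py; infer_instance

-- ===== CLAIM =====
def Claim_equal_match_label_key_py : Prop := ∀ (label_keys : List String) (site_name : Option String), Dom_match_label_key_py label_keys site_name → Spec_match_label_key_py label_keys site_name (match_label_key_py label_keys site_name)

-- ===== LEMMAS AND PROOFS =====
-- the fused loop equals: exact match first, else the pending candidate, else the first substring hit
lemma pvBLoop_eq (s : String) (keys : List String) (fs : Option String) :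
    pvBLoop s keys fs =
      (pvALoop s keys).or (fs.or ((keys.filter (fun k => PySem.Str.isIn s (PySem.Str.lower k))).head?)) := by
  induction keys generalizing fs with
  | nil => cases fs <;> simp [pvBLoop, pvALoop]
  | cons k rest ih =>
    by_cases hx : PySem.Str.lower k == s
    · simp [pvBLoop, pvALoop, hx]
    · by_cases hs : PySem.Chars.isIn s.toList (PySem.Chars.lower k.toList)
      all_goals cases fs <;>
        simp [pvBLoop, pvALoop, hx, hs, ih, Option.or]

-- ===== VERDICT =====
theorem match_label_key_py_spec : Claim_equal_match_label_key_py := by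
  intro label_keys site_name _
  unfold Spec_match_label_key_py match_label_key_py match_label_key_py_alt
  cases site_name with
  | none => rfl
  | some sn =>
    simp only
    by_cases h : sn = ""
    · simp [h]
    · simp only [h, if_false, pvBLoop_eq]
      cases hA : pvALoop (PySem.Str.lower (PySem.Str.strip sn)) label_keys with
      | some k => simp [Option.or]
      | none =>
        simp only [Option.none_or]
        cases (label_keys.filter fun k => PySem.Str.isIn (PySem.Str.lower (PySem.Str.strip sn)) (PySem.Str.lower k)) <;> simp
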